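-- pv_equiv track=rewrite | github.com/Ary0Darkk/NYS-Design-Optimisation-using-PySAM | utilities/month_from_hrs.py | hrs_to_months
-- ===== SOURCE A (Python) =====
-- def hrs_to_months(input_data: list) -> list:
--     input_data = list(input_data)
--     days_in_months = [31, 28, 31, 30, 31, 30, 31, 31, 30, 31, 30, 31]
--     idx = 0
--     output_data = []
--     for len_month in days_in_months:
--         # define index
--         stop_idx = idx + len_month * 24
--
--         # sum energy for month
--         sum_of_energy = sum(input_data[idx:stop_idx])
--
--         # add to list
--         output_data.append(sum_of_energy)
--
--         # index update
--         idx = stop_idx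
--
--     return output_data
-- ===== SOURCE B (Python) =====
-- # Streaming one-pass re-implementation: walk the hours once, closing a month
-- # whenever the index reaches the next cumulative month-end boundary.
-- _MONTH_END = (744, 1416, 2160, 2880, 3624, 4344, 5088, 5832, 6552, 7296, 8016, 8760)
--
--
-- def hrs_to_months(input_data: list) -> list:
--     done = []  # completed month sums
--     acc = 0    # running sum of the current month
--     for i, x in enumerate(input_data[:8760]):
--         if i == _MONTH_END[len(done)]:
--             done.append(acc)
--             acc = 0
--         acc += x
--     return done + [acc] + [0] * (11 - len(done))
-- ===== Notes on version B (the rewrite author's own statement) =====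
-- stated objective: alternative
-- what changed: Replaced the 12 per-month slice-and-sum passes over precomputed index windows by a single streaming pass with a running accumulator that is closed and appended whenever the hour index reaches the next cumulative month-end boundary, padding with zeros to 12 months.
import Mathlib
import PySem

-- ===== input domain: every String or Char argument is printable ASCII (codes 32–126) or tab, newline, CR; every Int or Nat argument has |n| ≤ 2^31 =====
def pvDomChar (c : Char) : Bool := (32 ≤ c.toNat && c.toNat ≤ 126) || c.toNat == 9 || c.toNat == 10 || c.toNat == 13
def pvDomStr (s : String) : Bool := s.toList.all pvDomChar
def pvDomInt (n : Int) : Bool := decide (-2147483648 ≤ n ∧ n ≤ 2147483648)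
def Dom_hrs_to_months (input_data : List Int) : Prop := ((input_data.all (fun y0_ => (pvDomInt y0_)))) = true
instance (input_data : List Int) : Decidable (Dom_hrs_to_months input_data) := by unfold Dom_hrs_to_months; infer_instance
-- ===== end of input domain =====

-- B walks the hours once with a running accumulator closed at each cumulative month-end boundary, instead of A's 12 slice-and-sum passes; alternative decomposition, same O(n) cost.

-- ===== PORT A =====
-- for len_month in days_in_months: stop = idx + len_month*24; append sum(input[idx:stop]); idx = stop
def hrs_to_months (input_data : List Int) : List Int :=
  let days_in_months : List Int := [31, 28, 31, 30, 31, 30, 31, 31, 30, 31, 30, 31]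
  let fin := days_in_months.foldl
    (fun (st : Int × List Int) (len_month : Int) =>
      let stop_idx := st.1 + len_month * 24
      let sum_of_energy := (PySem.List.slice input_data (some st.1) (some stop_idx)).foldl (· + ·) 0
      (stop_idx, st.2 ++ [sum_of_energy]))
    (0, [])
  fin.2

-- ===== PORT B =====
def pvMonthEnd : List Int := [744, 1416, 2160, 2880, 3624, 4344, 5088, 5832, 6552, 7296, 8016, 8760]

-- single pass over enumerate(input_data[:8760]): close the month when i hits the boundary, then pad to 12
def hrs_to_months_alt (input_data : List Int) : List Int :=
  let fin := (PySem.List.enumerate (PySem.List.slice input_data none (some 8760)) 0).foldl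
    (fun (st : List Int × Int) (p : Int × Int) =>
      if p.1 = pvMonthEnd.getD st.1.length 0 then (st.1 ++ [st.2], 0 + p.2)
      else (st.1, st.2 + p.2))
    ([], 0)
  fin.1 ++ [fin.2] ++ List.replicate (11 - fin.1.length) 0

-- ===== PRECONDITION & SPEC =====
def Spec_hrs_to_months (input_data : List Int) (out : List Int) : Prop := out = hrs_to_months_alt input_data
instance (input_data : List Int) (out : List Int) : Decidable (Spec_hrs_to_months input_data out) := by unfold Spec_hrs_to_months; infer_instance

-- ===== CLAIM (what is proved, stated in full; the proofs are below) =====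
def Claim_equal_hrs_to_months : Prop := ∀ (input_data : List Int), Dom_hrs_to_months input_data → Spec_hrs_to_months input_data (hrs_to_months input_data)

-- ===== LEMMAS AND PROOFS =====

-- B's loop body as a named step function
def pvStep (st : List Int × Int) (p : Int × Int) : List Int × Int :=
  if p.1 = pvMonthEnd.getD st.1.length 0 then (st.1 ++ [st.2], 0 + p.2)
  else (st.1, st.2 + p.2)

lemma pvStep_eq (st : List Int × Int) (p : Int × Int) :
    (fun (st : List Int × Int) (p : Int × Int) =>
      if p.1 = pvMonthEnd.getD st.1.length 0 then (st.1 ++ [st.2], 0 + p.2)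
      else (st.1, st.2 + p.2)) = pvStep := rfl

-- reference shape: the month sums from month (12 - fuel) on, given cursor i0 and pending acc
def pvF : Nat → Int → Int → List Int → List Int
  | 0, _, _, _ => []
  | (k+1), i0, acc, ys =>
      let e := pvMonthEnd.getD (11 - k) 0
      let n := (e - i0).toNat
      (acc + (ys.take n).sum) :: pvF k e 0 (ys.drop n)

lemma pvStep_stay (done : List Int) (acc x i : Int) (h : i ≠ pvMonthEnd.getD done.length 0) :
    pvStep (done, acc) (i, x) = (done, acc + x) := by
  simp only [pvStep]
  rw [if_neg (by simpa [List.getD_eq_getElem?_getD] using h)]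

lemma pvStep_cross (done : List Int) (acc x : Int) :
    pvStep (done, acc) (pvMonthEnd.getD done.length 0, x) = (done ++ [acc], 0 + x) := by
  simp [pvStep]

lemma pvF_succ (k : Nat) (i0 acc : Int) (ys : List Int) :
    pvF (k+1) i0 acc ys =
      (acc + (ys.take ((pvMonthEnd.getD (11 - k) 0 - i0).toNat)).sum)
        :: pvF k (pvMonthEnd.getD (11 - k) 0) 0 (ys.drop ((pvMonthEnd.getD (11 - k) 0 - i0).toNat)) := rfl

lemma pvF_nil : ∀ (k : Nat) (i0 : Int), pvF k i0 0 [] = List.replicate k 0 := by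
  intro k
  induction k with
  | zero => intro i0; rfl
  | succ k ih => intro i0; simp [pvF_succ, ih, List.replicate_succ]

-- no boundary is hit while i0 + |ys| stays ≤ the current month end
lemma pvStep_no_cross : ∀ (ys : List Int) (done : List Int) (acc i0 : Int),
    i0 + ys.length ≤ pvMonthEnd.getD done.length 0 →
    (PySem.List.enumerate ys i0).foldl pvStep (done, acc) = (done, acc + ys.sum) := by
  intro ys
  induction ys with
  | nil => intro done acc i0 _; simp [PySem.List.enumerate_nil]
  | cons x xs ih =>
      intro done acc i0 h
      simp only [List.length_cons] at h
      push_cast at h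
      rw [PySem.List.enumerate_cons, List.foldl_cons]
      rw [pvStep_stay done acc x i0 (by omega)]
      rw [ih done (acc + x) (i0 + 1) (by omega)]
      simp [add_assoc]

lemma pvMonthEnd_mono : ∀ (m : Nat), m ≤ 10 →
    pvMonthEnd.getD m 0 < pvMonthEnd.getD (m+1) 0 := by decide

lemma pvMonthEnd_nonneg : ∀ (m : Nat), m ≤ 11 → 0 ≤ pvMonthEnd.getD m 0 := by decide

-- main loop invariant: folding the remaining hours yields the remaining month sums
lemma pv_run : ∀ (k : Nat) (ys done : List Int) (acc i0 : Int),
    done.length + k = 11 → i0 ≤ pvMonthEnd.getD done.length 0 →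
    i0 + ys.length ≤ 8760 →
    ((PySem.List.enumerate ys i0).foldl pvStep (done, acc)).1
      ++ [((PySem.List.enumerate ys i0).foldl pvStep (done, acc)).2]
      ++ List.replicate (11 - ((PySem.List.enumerate ys i0).foldl pvStep (done, acc)).1.length) 0
      = done ++ pvF (k+1) i0 acc ys := by
  intro k
  induction k with
  | zero =>
      intro ys done acc i0 hlen hle hbound
      have h11 : done.length = 11 := by omega
      have he : pvMonthEnd.getD done.length 0 = 8760 := by rw [h11]; decide
      rw [pvStep_no_cross ys done acc i0 (by omega)]
      rw [pvF_succ]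
      have e11 : pvMonthEnd.getD (11 - 0) 0 = 8760 := by decide
      rw [e11]
      have htake : ys.take ((8760 - i0).toNat) = ys :=
        List.take_of_length_le (by omega)
      have hdrop : ys.drop ((8760 - i0).toNat) = [] :=
        List.drop_eq_nil_of_le (by omega)
      rw [htake, hdrop, pvF_nil]
      simp [h11]
  | succ k ih =>
      intro ys done acc i0 hlen hle hbound
      have hm : done.length = 10 - k := by omega
      have hmle : done.length ≤ 10 := by omega
      set e : Int := pvMonthEnd.getD done.length 0 with hedef
      have hmono : e < pvMonthEnd.getD (done.length + 1) 0 := pvMonthEnd_mono done.length hmle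
      have he0 : 0 ≤ e := pvMonthEnd_nonneg done.length (by omega)
      set n : Nat := (e - i0).toNat with hndef
      have hmidx : (11 : Nat) - (k + 1) = done.length := by omega
      by_cases hsplit : ys.length ≤ n
      · -- the input ends inside the current month: no more crossings, pad the rest
        rw [pvStep_no_cross ys done acc i0 (by omega)]
        rw [pvF_succ, hmidx, ← hedef, ← hndef]
        rw [List.take_of_length_le hsplit, List.drop_eq_nil_of_le hsplit, pvF_nil]
        rw [show (11 : Nat) - done.length = k + 1 by omega]
        simp
      · -- split off the rest of the current month, cross the boundary, recurse
        replace hsplit := Nat.lt_of_not_le hsplit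
        have hnlen : (ys.take n).length = n := by simp; omega
        have hdc : ys.drop n = ys[n] :: ys.drop (n+1) := List.drop_eq_getElem_cons hsplit
        conv_lhs => rw [show ys = ys.take n ++ ys.drop n from (List.take_append_drop n ys).symm]
        rw [PySem.List.enumerate_append, List.foldl_append,
            pvStep_no_cross (ys.take n) done acc i0 (by rw [hnlen]; omega),
            hnlen, show i0 + (n : Int) = e by omega,
            hdc, PySem.List.enumerate_cons, List.foldl_cons]
        rw [show pvStep (done, acc + (ys.take n).sum) (e, ys[n])
              = (done ++ [acc + (ys.take n).sum], 0 + ys[n]) from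
          hedef ▸ pvStep_cross done (acc + (ys.take n).sum) (ys[n])]
        rw [show (PySem.List.enumerate (ys.drop (n+1)) (e+1)).foldl pvStep
                  (done ++ [acc + (ys.take n).sum], 0 + ys[n])
              = (PySem.List.enumerate (ys.drop n) e).foldl pvStep
                  (done ++ [acc + (ys.take n).sum], 0) by
          rw [hdc, PySem.List.enumerate_cons, List.foldl_cons]
          rw [pvStep_stay (done ++ [acc + (ys.take n).sum]) 0 (ys[n]) e
                (by simp only [List.length_append, List.length_cons, List.length_nil,
                      Nat.zero_add, List.getD_eq_getElem?_getD] at hmono ⊢; omega)]]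
        rw [ih (ys.drop n) (done ++ [acc + (ys.take n).sum]) 0 e
              (by simp; omega)
              (by simp only [List.length_append, List.length_cons, List.length_nil,
                    Nat.zero_add]; omega)
              (by simp only [List.length_drop]; omega)]
        rw [pvF_succ (k+1), hmidx, ← hedef, ← hndef]
        simp

-- the twelve literal slice sums that A computes
lemma pvA_eq (input_data : List Int) :
    hrs_to_months input_data =
      [(input_data.take 744).sum, ((input_data.drop 744).take 672).sum,
       ((input_data.drop 1416).take 744).sum, ((input_data.drop 2160).take 720).sum,
       ((input_data.drop 2880).take 744).sum, ((input_data.drop 3624).take 720).sum,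
       ((input_data.drop 4344).take 744).sum, ((input_data.drop 5088).take 744).sum,
       ((input_data.drop 5832).take 720).sum, ((input_data.drop 6552).take 744).sum,
       ((input_data.drop 7296).take 720).sum, ((input_data.drop 8016).take 744).sum] := by
  unfold hrs_to_months
  simp [List.foldl_cons, PySem.List.slice_toNat, ← List.sum_eq_foldl]

-- a drop/take window below 8760 ignores the take-8760 truncation
lemma pv_seg (xs : List Int) (a l : Nat) (h : a + l ≤ 8760) :
    ((xs.take 8760).drop a).take l = (xs.drop a).take l := by
  rw [List.drop_take, List.take_take, min_eq_left (by omega)]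

-- ===== VERDICT (by name: the statement is the Claim_ definition above) =====
theorem hrs_to_months_spec : Claim_equal_hrs_to_months := by
  unfold Claim_equal_hrs_to_months Spec_hrs_to_months
  intro input_data _
  rw [pvA_eq]
  have hrun := pv_run 11 (input_data.take 8760) [] 0 0
    (by simp) (by decide) (by simp)
  simp only [List.nil_append] at hrun
  unfold hrs_to_months_alt
  rw [show PySem.List.slice input_data none (some (8760 : Int)) = input_data.take 8760 by
        rw [PySem.List.slice_to] <;> simp]
  simp only [pvStep_eq]
  rw [hrun]
  norm_num [pvF, pvMonthEnd]
  simp [List.drop_drop]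
  norm_num [pv_seg, List.take_take]
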